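-- pv_equiv track=rewrite | github.com/pbell97/adventofCode | 2023/13-pt1.py | GetVerticalMirrorColumns
-- ===== SOURCE A (Python) =====
-- def GetVerticalMirrorColumns(puzzle):
--     checks = []
--     for lineIndex,line in enumerate(puzzle):
--         checks.append([])
--         # Note: Dividing line is to the right of the indexed character
--         for dividingLineIndex in range(len(line)):
--             result = False
--             first = line[0:dividingLineIndex+1]
--             second = line[dividingLineIndex+1:]
--             first = first[::-1]
--             if len(first) == 0 or len(second) == 0:
--                 result = False
--             elif len(first) < len(second):
--                 result = second.startswith(first)
--             else:
--                 result = first.startswith(second)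
--             checks[lineIndex].append(result)
--
--     for columnIndex in range(len(checks[0])):
--         isMirror = True
--         for row in checks:
--             isMirror = checks[checks.index(row)][columnIndex] and isMirror
--         if isMirror:
--             return columnIndex + 1
--     return 0
-- ===== SOURCE B (Python) =====
-- def _mirrors_at(line, div):
--     left = line[:div + 1][::-1]
--     right = line[div + 1:]
--     if not left or not right:
--         return False
--     n = min(len(left), len(right))
--     return left[:n] == right[:n]
--
--
-- def GetVerticalMirrorColumns(puzzle):
--     width = len(puzzle[0]) if puzzle else 0
--     for div in range(width):
--         if all(_mirrors_at(line, div) for line in puzzle):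
--             return div + 1
--     return 0
-- ===== Notes on version B (the rewrite author's own statement) =====
-- stated objective: simpler
-- what changed: Dropped A's precomputed per-row boolean table and its checks.index re-lookup; B is a single fused loop over candidate dividing columns that tests every line directly with a min-length prefix comparison (left[:n] == right[:n]) instead of A's three-way startswith branching.
-- outside the precondition, e.g. on GetVerticalMirrorColumns(['##.', '##']): A returns 1, B returns 1; on GetVerticalMirrorColumns(['ab', '', 'ab']): A raises IndexError, B returns 0; on GetVerticalMirrorColumns([]): A raises IndexError, B returns 0
import Mathlib
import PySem

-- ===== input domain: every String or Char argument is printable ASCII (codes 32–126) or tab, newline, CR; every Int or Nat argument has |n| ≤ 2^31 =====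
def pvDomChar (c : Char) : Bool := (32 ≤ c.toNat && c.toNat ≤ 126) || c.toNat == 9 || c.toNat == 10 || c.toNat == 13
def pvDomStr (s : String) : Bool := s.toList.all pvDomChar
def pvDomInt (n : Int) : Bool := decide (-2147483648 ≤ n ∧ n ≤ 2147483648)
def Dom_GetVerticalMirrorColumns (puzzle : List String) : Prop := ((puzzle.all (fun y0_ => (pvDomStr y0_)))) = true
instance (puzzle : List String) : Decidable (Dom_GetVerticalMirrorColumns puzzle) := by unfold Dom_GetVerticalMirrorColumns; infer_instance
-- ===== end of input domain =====

-- B drops A's precomputed per-row boolean table (and its checks.index lookup) in favour of a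
-- single fused loop over candidate dividing columns testing each line by a min-length prefix
-- comparison; objective: simpler.


-- ===== PORT A =====
-- inner column loop of A: 'for columnIndex in range(len(checks[0])): … return columnIndex+1 … return 0'
def pvColLoopA (checks : List (List Bool)) : List Int → Int
  | [] => 0
  | c :: rest =>
    let isMirror := checks.foldl (fun isM row =>
      PySem.List.pyGetD
        (PySem.List.pyGetD checks (((PySem.List.index? checks row).getD 0 : Nat) : Int) [])
        c false && isM) true
    if isMirror then c + 1 else pvColLoopA checks rest

def GetVerticalMirrorColumns (puzzle : List String) : Int :=
  let checks : List (List Bool) :=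
    (PySem.List.enumerate puzzle 0).foldl (fun checks p =>
      checks ++ [(PySem.List.pyRange 0 (PySem.Str.len p.2) 1).foldl (fun row d =>
        let first := PySem.Str.slice p.2 (some 0) (some (d + 1))
        let second := PySem.Str.slice p.2 (some (d + 1)) none
        let first := (PySem.Str.slice? first none none (-1)).getD ""
        let result : Bool :=
          if PySem.Str.len first == 0 || PySem.Str.len second == 0 then false
          else if PySem.Str.len first < PySem.Str.len second then PySem.Str.startswith second first
          else PySem.Str.startswith first second
        row ++ [result]) []]) []
  -- checks[0]: Python raises IndexError on the empty puzzle; that input is outside Pre_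
  pvColLoopA checks (PySem.List.pyRange 0 (PySem.List.len (PySem.List.pyGetD checks 0 [])) 1)

-- ===== PORT B =====
def pvMirrorsAt (line : String) (d : Int) : Bool :=
  let left := (PySem.Str.slice? (PySem.Str.slice line none (some (d + 1))) none none (-1)).getD ""
  let right := PySem.Str.slice line (some (d + 1)) none
  if PySem.Str.len left == 0 || PySem.Str.len right == 0 then false
  else
    let n := min (PySem.Str.len left) (PySem.Str.len right)
    PySem.Str.slice left none (some n) == PySem.Str.slice right none (some n)

def pvDivLoopB (puzzle : List String) : List Int → Int
  | [] => 0
  | d :: rest =>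
    if puzzle.all (fun line => pvMirrorsAt line d) then d + 1 else pvDivLoopB puzzle rest

def GetVerticalMirrorColumns_alt (puzzle : List String) : Int :=
  let width : Int := match puzzle with | [] => 0 | line :: _ => PySem.Str.len line
  pvDivLoopB puzzle (PySem.List.pyRange 0 width 1)

-- ===== PRECONDITION & SPEC =====
-- Pre_ excludes the empty puzzle and puzzles with a row strictly shorter than the first row:
-- there A raises IndexError as soon as a column index reaches past that shorter row, except in
-- corner cases (a mirror column found before the shorter row is indexed), in which cases B
-- happens to return the same value anyway.
def Pre_GetVerticalMirrorColumns (puzzle : List String) : Prop :=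
  puzzle ≠ [] ∧ ∀ s ∈ puzzle, PySem.Str.len (puzzle.headD "") ≤ PySem.Str.len s
instance (puzzle : List String) : Decidable (Pre_GetVerticalMirrorColumns puzzle) := by
  unfold Pre_GetVerticalMirrorColumns; infer_instance

def pvWitness_GetVerticalMirrorColumns : List String := ["#.##.", "..##."]

def Spec_GetVerticalMirrorColumns (puzzle : List String) (out : Int) : Prop := out = GetVerticalMirrorColumns_alt puzzle
instance (puzzle : List String) (out : Int) : Decidable (Spec_GetVerticalMirrorColumns puzzle out) := by unfold Spec_GetVerticalMirrorColumns; infer_instance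

-- ===== CLAIM (what is proved, stated in full; the proofs are below) =====
def Claim_equal_GetVerticalMirrorColumns : Prop := ∀ (puzzle : List String), Dom_GetVerticalMirrorColumns puzzle → Pre_GetVerticalMirrorColumns puzzle → Spec_GetVerticalMirrorColumns puzzle (GetVerticalMirrorColumns puzzle)

-- ===== LEMMAS AND PROOFS =====

def pvResA (line : String) (d : Int) : Bool :=
  let first := PySem.Str.slice line (some 0) (some (d + 1))
  let second := PySem.Str.slice line (some (d + 1)) none
  let first := (PySem.Str.slice? first none none (-1)).getD ""
  if PySem.Str.len first == 0 || PySem.Str.len second == 0 then false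
  else if PySem.Str.len first < PySem.Str.len second then PySem.Str.startswith second first
  else PySem.Str.startswith first second

def pvRowA (line : String) : List Bool :=
  (PySem.List.pyRange 0 (PySem.Str.len line) 1).map (pvResA line)

lemma pv_startswith_min (f s : List Char) :
    (if f.length < s.length then PySem.Chars.startswith s f else PySem.Chars.startswith f s)
    = (f.take (min f.length s.length) == s.take (min f.length s.length)) := by
  rw [Bool.eq_iff_iff, beq_iff_eq]
  by_cases h : f.length < s.length
  · rw [if_pos h, PySem.Chars.startswith_iff, List.prefix_iff_eq_take,
      min_eq_left h.le, List.take_length]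
  · rw [if_neg h, PySem.Chars.startswith_iff, List.prefix_iff_eq_take,
      min_eq_right (le_of_not_gt h), List.take_length]
    exact eq_comm

lemma pv_res_eq (line : String) (c : Int) (h0 : 0 ≤ c) (hc : c < PySem.Str.len line) :
    pvResA line c = pvMirrorsAt line c := by
  obtain ⟨m, rfl⟩ := Int.eq_ofNat_of_zero_le h0
  have h1 : (0:Int) ≤ (m:Int) + 1 := by omega
  have hlen : m < line.length := by
    simpa [pysem, PySem.Str.len] using hc
  simp only [pvResA, pvMirrorsAt]
  simp [pysem, PySem.Str.slice?_none_none_neg_one, PySem.List.slice_to _ h1,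
        PySem.List.slice_from _ h1]
  have hminA : min ((m:Int) + 1) (line.length : Int) = (m:Int) + 1 := min_eq_left (by omega)
  rw [hminA]
  have hne1 : ¬((m:Int) + 1 = 0) := by omega
  simp only [hne1, decide_false, Bool.not_false, Bool.true_and]
  by_cases hlast : line.length - (m + 1) = 0
  · simp [hlast]
  · simp only [hlast, decide_false, Bool.not_false, Bool.true_and]
    set f := (List.take (m + 1) line.toList).reverse with hfdef
    set s := List.drop (m + 1) line.toList with hsdef
    have htl : line.toList.length = line.length := by simp
    have hf : f.length = m + 1 := by simp [hfdef, htl]; omega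
    have hs : s.length = line.length - (m + 1) := by simp [hsdef, htl]
    have hcond : ((m:Int) + 1 < ((line.length - (m + 1) : Nat) : Int) ∨ line.length < line.length - (m + 1)) ↔ f.length < s.length := by
      rw [hf, hs]; omega
    rw [if_congr hcond rfl rfl, pv_startswith_min]
    have hn : (0:Int) ≤ min ((m:Int) + 1) ((line.length - (m + 1) : Nat) : Int) := by omega
    rw [Bool.eq_iff_iff, beq_iff_eq, beq_iff_eq, String.ext_iff]
    simp only [pysem, PySem.List.slice_to _ hn]
    have hmin : (min ((m:Int) + 1) ((line.length - (m + 1) : Nat) : Int)).toNat = min f.length s.length := by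
      rw [hf, hs]; omega
    rw [hmin, String.toList_ofList, PySem.List.slice_from _ h1]
    have h2 : ((m:Int) + 1).toNat = m + 1 := by omega
    rw [h2]

-- the enumerate-foldl of A ignores the indices
lemma pv_foldl_enumerate_snd {β : Type} (F : β → String → β) (xs : List String) (s : Int) (init : β) :
    (PySem.List.enumerate xs s).foldl (fun acc p => F acc p.2) init = xs.foldl F init := by
  induction xs generalizing s init with
  | nil => simp [PySem.List.enumerate_nil]
  | cons x xs ih => simp [PySem.List.enumerate_cons, ih]

lemma pv_checks_eq (puzzle : List String) :
    ((PySem.List.enumerate puzzle 0).foldl (fun checks p =>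
      checks ++ [(PySem.List.pyRange 0 (PySem.Str.len p.2) 1).foldl (fun row d =>
        row ++ [pvResA p.2 d]) []]) ([] : List (List Bool))) = puzzle.map pvRowA := by
  rw [pv_foldl_enumerate_snd
    (fun checks line => checks ++ [(PySem.List.pyRange 0 (PySem.Str.len line) 1).foldl (fun row d => row ++ [pvResA line d]) []])]
  have hbody : (fun (checks : List (List Bool)) (line : String) =>
      checks ++ [(PySem.List.pyRange 0 (PySem.Str.len line) 1).foldl (fun row d => row ++ [pvResA line d]) []])
      = fun checks line => checks ++ [pvRowA line] := by
    funext checks line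
    rw [PySem.List.foldl_append_singleton_eq_map]
    simp [pvRowA]
  rw [hbody, PySem.List.foldl_append_singleton_eq_map]
  simp

lemma pv_foldl_and (g : List Bool → Bool) (l : List (List Bool)) :
    ∀ b, l.foldl (fun a x => g x && a) b = (l.all g && b) := by
  induction l with
  | nil => simp
  | cons x xs ih =>
    intro b
    simp only [List.foldl_cons, List.all_cons, ih]
    cases g x <;> cases b <;> simp

lemma pv_isMirror_eq (checks : List (List Bool)) (c : Int) :
    checks.foldl (fun isM row =>
      PySem.List.pyGetD
        (PySem.List.pyGetD checks (((PySem.List.index? checks row).getD 0 : Nat) : Int) [])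
        c false && isM) true
    = checks.all (fun row => PySem.List.pyGetD row c false) := by
  rw [PySem.List.foldl_congr_mem checks _ (fun isM row => PySem.List.pyGetD row c false && isM)]
  · rw [pv_foldl_and]; simp
  · intro acc row hrow
    have hmem := (PySem.List.index?_isSome_iff checks row).2 hrow
    obtain ⟨k, hk⟩ := Option.isSome_iff_exists.1 hmem
    obtain ⟨hkl, hval, _⟩ := PySem.List.getElem_of_index?_eq_some hk
    rw [hk]
    simp only [Option.getD_some]
    rw [PySem.List.pyGetD_of_nonneg _ _ (Int.natCast_nonneg k), Int.toNat_natCast,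
      List.getD_eq_getElem _ _ hkl, hval]

def pvChecksA (puzzle : List String) : List (List Bool) :=
  (PySem.List.enumerate puzzle 0).foldl (fun checks p =>
    checks ++ [(PySem.List.pyRange 0 (PySem.Str.len p.2) 1).foldl (fun row d =>
      row ++ [pvResA p.2 d]) []]) []

lemma pv_A_eq (puzzle : List String) :
    GetVerticalMirrorColumns puzzle
    = pvColLoopA (pvChecksA puzzle)
        (PySem.List.pyRange 0 (PySem.List.len (PySem.List.pyGetD (pvChecksA puzzle) 0 [])) 1) := rfl

lemma pv_checksA_map (puzzle : List String) : pvChecksA puzzle = puzzle.map pvRowA :=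
  pv_checks_eq puzzle

lemma pv_row_getD (line : String) (c : Int) (h0 : 0 ≤ c) (hc : c < PySem.Str.len line) :
    PySem.List.pyGetD (pvRowA line) c false = pvMirrorsAt line c := by
  rw [pvRowA, PySem.List.pyGetD_map_pyRange_of_nonneg _ _ _ _ h0 hc, pv_res_eq line c h0 hc]

lemma pv_colLoop_eq (puzzle : List String) (L : Int)
    (hlen : ∀ s ∈ puzzle, L ≤ PySem.Str.len s) :
    ∀ cols : List Int, (∀ c ∈ cols, 0 ≤ c ∧ c < L) →
      pvColLoopA (puzzle.map pvRowA) cols = pvDivLoopB puzzle cols := by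
  intro cols
  induction cols with
  | nil => intro _; rfl
  | cons c rest ih =>
    intro h
    obtain ⟨h0, hcL⟩ := h c (List.mem_cons_self ..)
    simp only [pvColLoopA, pvDivLoopB]
    rw [pv_isMirror_eq]
    have hall : (puzzle.map pvRowA).all (fun row => PySem.List.pyGetD row c false)
        = puzzle.all (fun line => pvMirrorsAt line c) := by
      rw [List.all_map, Bool.eq_iff_iff, List.all_eq_true, List.all_eq_true]
      refine forall_congr' fun line => imp_congr_right fun hline => ?_
      rw [Function.comp_apply, pv_row_getD line c h0 (lt_of_lt_of_le hcL (hlen line hline))]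
    rw [hall]
    split
    · rfl
    · exact ih (fun x hx => h x (List.mem_cons_of_mem _ hx))


-- ===== VERDICT (by name: the statement is the Claim_ definition above) =====
theorem GetVerticalMirrorColumns_spec : Claim_equal_GetVerticalMirrorColumns := by
  intro puzzle _ hpre
  obtain ⟨hne, hsame⟩ := hpre
  unfold Spec_GetVerticalMirrorColumns
  obtain ⟨s0, rest, rfl⟩ : ∃ s0 rest, puzzle = s0 :: rest := by
    cases puzzle with
    | nil => exact absurd rfl hne
    | cons a b => exact ⟨a, b, rfl⟩
  rw [pv_A_eq, pv_checksA_map]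
  have hhead : PySem.List.pyGetD ((s0 :: rest).map pvRowA) 0 [] = pvRowA s0 := by
    rw [PySem.List.pyGetD_of_nonneg _ _ (by omega)]
    simp
  have hlenrow : PySem.List.len (pvRowA s0) = PySem.Str.len s0 := by
    simp [pvRowA, pysem, PySem.List.length_pyRange_one]
  rw [hhead, hlenrow]
  show _ = pvDivLoopB (s0 :: rest) (PySem.List.pyRange 0 (PySem.Str.len s0) 1)
  apply pv_colLoop_eq
  · intro s hs
    exact hsame s hs
  · intro c hc
    rw [PySem.List.mem_pyRange_one] at hc
    exact hc
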